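-- pv_equiv track=rewrite | github.com/rkneusel9/StrangeCodeBook | chapter_12/filska.py | Parse
-- ===== SOURCE A (Python) =====
-- def Parse(src):
--     """
--     Parse Filska source code
--     """
--
--     eoln = False
--     t = ""
--     for c in src:
--         if (eoln) and (c == '\n'):
--             eoln = False
--         elif (c == '"') and (not eoln):
--             eoln = True
--         elif (not eoln):
--             t += c
--     return " ".join(t.split()).upper().split()
-- ===== SOURCE B (Python) =====
-- def Parse(src):
--     """
--     Parse Filska source code
--     """
--     pieces = []
--     for line in src.split('\n'):
--         q = line.find('"')
--         pieces.append(line + '\n' if q < 0 else line[:q])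
--     t = ''.join(pieces)
--     return " ".join(t.split()).upper().split()
-- ===== Notes on version B (the rewrite author's own statement) =====
-- stated objective: simpler
-- what changed: Replaced A's character-by-character scan with an eoln comment-state flag by a line-oriented pass: split the source into lines, keep each line only up to its first quote character (re-appending the newline for comment-free lines), join and tokenize as A does; bulk str methods also avoid A's per-character string concatenation.
import Mathlib
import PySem

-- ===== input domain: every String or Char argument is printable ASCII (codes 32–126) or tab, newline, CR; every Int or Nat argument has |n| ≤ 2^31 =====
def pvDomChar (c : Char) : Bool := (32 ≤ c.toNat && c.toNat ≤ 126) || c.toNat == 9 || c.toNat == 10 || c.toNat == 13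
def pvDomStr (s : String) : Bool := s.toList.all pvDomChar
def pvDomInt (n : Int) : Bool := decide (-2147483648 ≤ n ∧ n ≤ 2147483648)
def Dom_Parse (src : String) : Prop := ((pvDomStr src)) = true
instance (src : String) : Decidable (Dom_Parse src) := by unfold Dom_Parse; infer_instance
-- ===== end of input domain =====

-- B replaces A's character-by-character eoln state machine by a line-split / first-quote pass (objective: simpler).

-- ===== PORT A =====
-- the loop body of A: state is (eoln, t)
def ParseStep (st : Bool × List Char) (c : Char) : Bool × List Char :=
  if st.1 && (c == '\n') then (false, st.2)
  else if (c == '"') && !st.1 then (true, st.2)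
  else if !st.1 then (st.1, st.2 ++ [c])
  else st

def Parse (src : String) : List String :=
  let st := src.toList.foldl ParseStep (false, [])
  -- " ".join(t.split()).upper().split()
  (PySem.Chars.split₀ (PySem.Chars.upper
    (PySem.Chars.join [' '] (PySem.Chars.split₀ st.2)))).map String.mk

-- ===== PORT B =====
def Parse_alt (src : String) : List String :=
  let pieces := (PySem.Chars.splitOn src.toList ['\n']).map (fun line =>
    let q := PySem.Chars.find line ['"']
    if q < 0 then line ++ ['\n'] else PySem.Chars.slice line none (some q))
  let t := PySem.Chars.join [] pieces
  (PySem.Chars.split₀ (PySem.Chars.upper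
    (PySem.Chars.join [' '] (PySem.Chars.split₀ t)))).map String.mk

-- ===== PRECONDITION & SPEC =====
def Spec_Parse (src : String) (out : List String) : Prop := out = Parse_alt src
instance (src : String) (out : List String) : Decidable (Spec_Parse src out) := by unfold Spec_Parse; infer_instance

-- ===== CLAIM (what is proved, stated in full; the proofs are below) =====
def Claim_equal_Parse : Prop := ∀ (src : String), Dom_Parse src → Spec_Parse src (Parse src)

-- ===== LEMMAS AND PROOFS =====

-- what A's fold appends to t from the eoln = false state (pvG) and from the eoln = true state (pvH)
mutual
def pvG : List Char → List Char
  | [] => []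
  | c :: rest => if c = '"' then pvH rest else c :: pvG rest
def pvH : List Char → List Char
  | [] => []
  | c :: rest => if c = '\n' then pvG rest else pvH rest
end
-- the same two for B (B keeps a '\n' after a quote-free line, including the last one)
mutual
def pvG' : List Char → List Char
  | [] => ['\n']
  | c :: rest => if c = '"' then pvH' rest else c :: pvG' rest
def pvH' : List Char → List Char
  | [] => []
  | c :: rest => if c = '\n' then pvG' rest else pvH' rest
end

-- reference function for Chars.splitOn with sep = ['\n']
def pvConsHead (p : List Char) : List (List Char) → List (List Char)
  | [] => [p]
  | x :: xs => (p ++ x) :: xs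
def pvLines : List Char → List (List Char)
  | [] => [[]]
  | c :: rest => if c = '\n' then [] :: pvLines rest else pvConsHead [c] (pvLines rest)

-- B's per-line function, in closed form
def pvFLine (l : List Char) : List Char :=
  if '"' ∈ l then l.takeWhile (· ≠ '"') else l ++ ['\n']

theorem pvFold_spec (cs : List Char) : ∀ (t : List Char),
    (cs.foldl ParseStep (false, t)).2 = t ++ pvG cs ∧
    (cs.foldl ParseStep (true, t)).2 = t ++ pvH cs := by
  induction cs with
  | nil => intro t; simp [pvG, pvH]
  | cons c rest ih =>
    intro t
    constructor
    · by_cases hq : c = '"'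
      · simp [ParseStep, hq, pvG, (ih t).2]
      · simp [ParseStep, hq, pvG, (ih (t ++ [c])).1]
    · by_cases hn : c = '\n'
      · simp [ParseStep, hn, pvH, (ih t).1]
      · by_cases hq : c = '"' <;> simp [ParseStep, hn, hq, pvH, (ih t).2]

theorem pvLines_ne_nil (cs : List Char) : pvLines cs ≠ [] := by
  cases cs with
  | nil => simp [pvLines]
  | cons c rest =>
    simp only [pvLines]
    split
    · simp
    · cases h : pvLines rest <;> simp [pvConsHead]

theorem pvSplitOn_go (l : List Char) : ∀ (fuel : Nat) (cur : List Char) (acc : List (List Char)),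
    l.length ≤ fuel →
    PySem.Chars.splitOn.go ['\n'] fuel l cur acc =
      acc.reverse ++ pvConsHead cur.reverse (pvLines l) := by
  induction l with
  | nil =>
    intro fuel cur acc _
    cases fuel <;> simp [PySem.Chars.splitOn.go, pvLines, pvConsHead]
  | cons c rest ih =>
    intro fuel cur acc hf
    cases fuel with
    | zero => simp at hf
    | succ f =>
      have hf' : rest.length ≤ f := by simpa using hf
      by_cases hn : c = '\n'
      · have : List.isPrefixOf ['\n'] (c :: rest) = true := by simp [List.isPrefixOf, hn]
        rw [PySem.Chars.splitOn.go]
        simp only [this, if_pos, List.length_cons, List.length_nil, List.drop_succ_cons,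
          List.drop_zero]
        rw [ih f [] (cur.reverse :: acc) hf']
        cases h : pvLines rest with
        | nil => exact absurd h (pvLines_ne_nil rest)
        | cons x xs => simp [pvLines, hn, pvConsHead, h]
      · have : List.isPrefixOf ['\n'] (c :: rest) = false := by
          simp [List.isPrefixOf]
          exact fun h => absurd h.symm hn
        rw [PySem.Chars.splitOn.go]
        rw [if_neg (by simp [this])]
        rw [ih f (c :: cur) acc hf']
        cases h : pvLines rest with
        | nil => exact absurd h (pvLines_ne_nil rest)
        | cons x xs => simp [pvLines, hn, pvConsHead, h]

theorem pvSplitOn_eq (cs : List Char) : PySem.Chars.splitOn cs ['\n'] = pvLines cs := by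
  rw [PySem.Chars.splitOn, pvSplitOn_go cs (cs.length + 1) [] [] (by omega)]
  cases h : pvLines cs with
  | nil => exact absurd h (pvLines_ne_nil cs)
  | cons x xs => simp [pvConsHead]

theorem pvFind_go_quote (l : List Char) : ∀ (k : Nat),
    PySem.Chars.find.go ['"'] l k =
      if '"' ∈ l then ((k : Int) + (l.takeWhile (· ≠ '"')).length) else -1 := by
  induction l with
  | nil => intro k; simp [PySem.Chars.find.go]
  | cons c rest ih =>
    intro k
    by_cases hq : c = '"'
    · have : List.isPrefixOf ['"'] (c :: rest) = true := by simp [List.isPrefixOf, hq]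
      rw [PySem.Chars.find.go, if_pos this]
      simp [hq, List.takeWhile]
    · have : List.isPrefixOf ['"'] (c :: rest) = false := by
        simp [List.isPrefixOf]
        exact fun h => absurd h.symm hq
      rw [PySem.Chars.find.go, if_neg (by simp [this]), ih (k + 1)]
      by_cases hm : '"' ∈ rest <;>
        simp [hm, hq, List.takeWhile, Ne.symm hq] <;> push_cast <;> ring

theorem pvTake_takeWhile (l : List Char) (p : Char → Bool) :
    l.take (l.takeWhile p).length = l.takeWhile p := by
  induction l with
  | nil => simp
  | cons c rest ih => by_cases h : p c <;> simp [h, ih]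

theorem pvLine_eq (l : List Char) :
    (let q := PySem.Chars.find l ['"']
     if q < 0 then l ++ ['\n'] else PySem.Chars.slice l none (some q)) = pvFLine l := by
  show (if PySem.Chars.find l ['"'] < 0 then _ else _) = _
  rw [PySem.Chars.find, pvFind_go_quote l 0]
  unfold pvFLine
  by_cases hm : '"' ∈ l
  · have h0 : ¬ (((0:Nat) : Int) + ((l.takeWhile (· ≠ '"')).length : Int) < 0) := by
      push_cast; omega
    rw [if_pos hm, if_pos hm, if_neg h0,
      PySem.Chars.slice_eq_listSlice, PySem.List.slice_to _ (by push_cast; omega)]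
    simp only [Nat.cast_zero, Int.zero_add, Int.toNat_natCast]
    exact pvTake_takeWhile l _
  · simp [hm]

theorem pvJoin_nil_flatten (ps : List (List Char)) : PySem.Chars.join [] ps = ps.flatten := by
  induction ps with
  | nil => simp [PySem.Chars.join_nil]
  | cons x xs ih =>
    cases xs with
    | nil => simp [PySem.Chars.join_singleton]
    | cons y ys => rw [PySem.Chars.join_cons_cons, ih]; simp

theorem pvFlatten_lines (cs : List Char) :
    ((pvLines cs).map pvFLine).flatten = pvG' cs ∧
    ((pvLines cs).tail.map pvFLine).flatten = pvH' cs := by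
  induction cs with
  | nil => simp [pvLines, pvFLine, pvG', pvH']
  | cons c rest ih =>
    obtain ⟨x, xs, hx⟩ : ∃ x xs, pvLines rest = x :: xs := by
      cases h : pvLines rest with
      | nil => exact absurd h (pvLines_ne_nil rest)
      | cons a as => exact ⟨a, as, rfl⟩
    by_cases hn : c = '\n'
    · constructor
      · simp [pvLines, hn, pvFLine, pvG', ih.1]
      · simp [pvLines, hn, pvH', ih.1]
    · have hlines : pvLines (c :: rest) = (c :: x) :: xs := by
        simp [pvLines, hn, hx, pvConsHead]
      constructor
      · rw [hlines]
        by_cases hq : c = '"'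
        · have h1 : pvFLine (c :: x) = [] := by simp [pvFLine, hq, List.takeWhile]
          have h2 := ih.2
          rw [hx] at h2
          simp only [List.map_cons, List.flatten_cons, h1, List.nil_append, pvG', if_pos hq]
          simpa using h2
        · have h1 : pvFLine (c :: x) = c :: pvFLine x := by
            by_cases hm : '"' ∈ x <;>
              simp [pvFLine, hm, hq, List.takeWhile, Ne.symm hq]
          have h2 := ih.1
          rw [hx] at h2
          simp only [List.map_cons, List.flatten_cons, h1, pvG', if_neg hq]
          simp only [List.map_cons, List.flatten_cons] at h2
          simp [← h2]
      · rw [hlines]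
        have h2 := ih.2
        rw [hx] at h2
        simp only [List.tail_cons] at h2 ⊢
        simp [pvH', hn, h2]

theorem pvJoin_map_lines (cs : List Char) :
    (PySem.Chars.join [] ((pvLines cs).map (fun line =>
      let q := PySem.Chars.find line ['"']
      if q < 0 then line ++ ['\n'] else PySem.Chars.slice line none (some q)))) = pvG' cs := by
  rw [pvJoin_nil_flatten, List.map_congr_left (fun l _ => pvLine_eq l)]
  exact (pvFlatten_lines cs).1

theorem pvGG' (cs : List Char) :
    (pvG' cs = pvG cs ++ ['\n'] ∨ pvG' cs = pvG cs) ∧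
    (pvH' cs = pvH cs ++ ['\n'] ∨ pvH' cs = pvH cs) := by
  induction cs with
  | nil => simp [pvG, pvH, pvG', pvH']
  | cons c rest ih =>
    constructor
    · by_cases hq : c = '"'
      · rcases ih.2 with h | h <;> simp [pvG, pvG', hq, h]
      · rcases ih.1 with h | h <;> simp [pvG, pvG', hq, h]
    · by_cases hn : c = '\n'
      · rcases ih.1 with h | h <;> simp [pvH, pvH', hn, h]
      · rcases ih.2 with h | h <;> simp [pvH, pvH', hn, h]

theorem pvSplit₀_go_trailing (t : List Char) : ∀ (cur : List Char) (acc : List (List Char)),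
    PySem.Chars.split₀.go (t ++ ['\n']) cur acc = PySem.Chars.split₀.go t cur acc := by
  induction t with
  | nil =>
    intro cur acc
    cases cur <;> simp [PySem.Chars.split₀.go, PySem.Chars.isspace]
  | cons c rest ih =>
    intro cur acc
    by_cases hs : PySem.Chars.isspace c = true
    · cases cur <;> simp [PySem.Chars.split₀.go, hs, ih]
    · simp [PySem.Chars.split₀.go, hs, ih]

theorem pvSplit₀_trailing (t : List Char) :
    PySem.Chars.split₀ (t ++ ['\n']) = PySem.Chars.split₀ t := by
  rw [PySem.Chars.split₀, PySem.Chars.split₀, pvSplit₀_go_trailing]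

-- ===== VERDICT (by name: the statement is the Claim_ definition above) =====
theorem Parse_spec : Claim_equal_Parse := by
  intro src _
  unfold Spec_Parse Parse Parse_alt
  dsimp only
  have h1 := (pvFold_spec src.toList []).1
  rw [h1, List.nil_append, pvSplitOn_eq, pvJoin_map_lines]
  rcases (pvGG' src.toList).1 with h | h
  · rw [h, pvSplit₀_trailing]
  · rw [h]
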